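-- pv_equiv track=rewrite | github.com/ddfeyes/bananas31-dashboard | tests/test_volatility_regime.py | hmm_smooth
-- ===== SOURCE A (Python) =====
-- def hmm_smooth(raw_regimes: list[str], min_duration: int = 2) -> list[str]:
--     """
--     HMM-style smoothing: a state change only 'sticks' after min_duration
--     consecutive observations of the new state.
--     Short-lived excursions are replaced with the previous stable state.
--
--     Algorithm:
--       - Track current confirmed state and run of the candidate state.
--       - If candidate runs >= min_duration, confirm it.
--       - Until then, emit the previous confirmed state.
--     """
--     if not raw_regimes:
--         return []
--     if min_duration <= 1:
--         return list(raw_regimes)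
--
--     smoothed = []
--     confirmed = raw_regimes[0]
--     candidate = raw_regimes[0]
--     run = 1
--
--     for r in raw_regimes:
--         if r == candidate:
--             run += 1
--         else:
--             candidate = r
--             run = 1
--
--         if run >= min_duration:
--             confirmed = candidate
--
--         smoothed.append(confirmed)
--
--     return smoothed
-- ===== SOURCE B (Python) =====
-- def hmm_smooth(raw_regimes: list[str], min_duration: int = 2) -> list[str]:
--     if not raw_regimes:
--         return []
--     if min_duration <= 1:
--         return list(raw_regimes)
--     # run-length encode the input
--     groups = []
--     for r in raw_regimes:
--         if groups and groups[-1][0] == r: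
--             groups[-1][1] += 1
--         else:
--             groups.append([r, 1])
--     # emit each group's output en bloc
--     out = []
--     confirmed = raw_regimes[0]
--     for v, L in groups:
--         k = min(min_duration - 1, L)
--         out += [confirmed] * k + [v] * (L - k)
--         if L >= min_duration:
--             confirmed = v
--     return out
-- ===== Notes on version B (the rewrite author's own statement) =====
-- stated objective: alternative
-- what changed: B first run-length-encodes the input into (value, length) groups and then emits each group's output en bloc (min(min_duration-1, L) copies of the previous confirmed state followed by the rest as the group's value), replacing A's element-by-element confirmed/candidate/run state machine.
import Mathlib
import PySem

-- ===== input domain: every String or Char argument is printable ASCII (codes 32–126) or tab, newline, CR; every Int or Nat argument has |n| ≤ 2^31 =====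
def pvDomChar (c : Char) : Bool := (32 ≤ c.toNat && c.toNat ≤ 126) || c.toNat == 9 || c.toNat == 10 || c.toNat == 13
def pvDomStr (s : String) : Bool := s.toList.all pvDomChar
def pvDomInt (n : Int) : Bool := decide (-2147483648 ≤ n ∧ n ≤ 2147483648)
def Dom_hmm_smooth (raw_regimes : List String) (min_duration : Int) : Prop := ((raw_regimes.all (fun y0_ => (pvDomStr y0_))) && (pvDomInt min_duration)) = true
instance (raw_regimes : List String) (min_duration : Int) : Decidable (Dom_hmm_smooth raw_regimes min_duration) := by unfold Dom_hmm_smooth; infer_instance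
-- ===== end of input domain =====

-- B replaces A's element-by-element confirmed/candidate/run state machine with a
-- run-length-encoding pass followed by per-group block emission (alternative
-- decomposition, same O(n) cost); return value proved identical on all inputs.

-- ===== PORT A =====
-- one iteration of A's loop over state (smoothed, confirmed, candidate, run)
def pvStepA (md : Int) : (List String × String × String × Int) → String → (List String × String × String × Int)
  | (sm, confirmed, candidate, run), r =>
    let p : String × Int := if r = candidate then (candidate, run + 1) else (r, 1)
    let confirmed' := if md ≤ p.2 then p.1 else confirmed
    (sm ++ [confirmed'], confirmed', p.1, p.2)

def hmm_smooth (raw_regimes : List String) (min_duration : Int) : List String :=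
  match raw_regimes with
  | [] => []
  | r0 :: _ =>
    if min_duration ≤ 1 then raw_regimes
    else (raw_regimes.foldl (pvStepA min_duration) ([], r0, r0, 1)).1

-- ===== PORT B =====
-- Source B's RLE loop: groups kept head-first (Python appends to / mutates the LAST
-- entry; here the head plays that role), reversed once at the end
def pvRStep : List (String × Int) → String → List (String × Int)
  | [], r => [(r, 1)]
  | (v, c) :: rest, r => if v = r then (v, c + 1) :: rest else (r, 1) :: (v, c) :: rest

def pvRle (xs : List String) : List (String × Int) :=
  (xs.foldl pvRStep []).reverse

-- one iteration of Source B's group loop over state (out, confirmed)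
def pvStepB (md : Int) : (List String × String) → (String × Int) → (List String × String)
  | (out, confirmed), (v, L) =>
    let k := min (md - 1) L
    (out ++ List.replicate k.toNat confirmed ++ List.replicate (L - k).toNat v,
     if md ≤ L then v else confirmed)

def hmm_smooth_alt (raw_regimes : List String) (min_duration : Int) : List String :=
  match raw_regimes with
  | [] => []
  | r0 :: _ =>
    if min_duration ≤ 1 then raw_regimes
    else ((pvRle raw_regimes).foldl (pvStepB min_duration) ([], r0)).1

-- ===== PRECONDITION & SPEC =====
def Spec_hmm_smooth (raw_regimes : List String) (min_duration : Int) (out : List String) : Prop := out = hmm_smooth_alt raw_regimes min_duration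
instance (raw_regimes : List String) (min_duration : Int) (out : List String) : Decidable (Spec_hmm_smooth raw_regimes min_duration out) := by unfold Spec_hmm_smooth; infer_instance

-- ===== CLAIM (what is proved, stated in full; the proofs are below) =====
def Claim_equal_hmm_smooth : Prop := ∀ (raw_regimes : List String) (min_duration : Int), Dom_hmm_smooth raw_regimes min_duration → Spec_hmm_smooth raw_regimes min_duration (hmm_smooth raw_regimes min_duration)

-- ===== LEMMAS AND PROOFS =====

-- expand a group list back to the flat regime list
def pvFlat (gs : List (String × Int)) : List String :=
  gs.flatMap (fun g => List.replicate g.2.toNat g.1)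

-- A's fold over a run of m further copies of the current candidate v, entering with run = j
theorem pvA_in (md : Int) (m : Nat) : ∀ (j : Int) (out : List String) (c v : String),
    1 ≤ j → 2 ≤ md → (md ≤ j → c = v) →
    List.foldl (pvStepA md) (out, c, v, j) (List.replicate m v) =
      (out ++ List.replicate (min ((md - 1 - j).toNat) m) c
           ++ List.replicate (m - min ((md - 1 - j).toNat) m) v,
       (if md ≤ j + (m : Int) then v else c), v, j + (m : Int)) := by
  induction m with
  | zero =>
    intro j out c v hj hmd hcv
    by_cases h : md ≤ j
    · simp [h, hcv h]
    · simp [h]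
  | succ m ih =>
    intro j out c v hj hmd hcv
    by_cases h : md ≤ j + 1
    · have hstep : pvStepA md (out, c, v, j) v = (out ++ [v], v, v, j + 1) := by
        simp [pvStepA, h]
      rw [List.replicate_succ, List.foldl_cons, hstep,
          ih (j + 1) _ _ v (by omega) hmd (fun _ => rfl)]
      have h0 : (md - 1 - (j + 1)).toNat = 0 := by omega
      have h1 : (md - 1 - j).toNat = 0 := by omega
      push_cast
      simp [h0, h1, List.replicate_succ, show md ≤ j + ((m : Int) + 1) by omega,
            show md ≤ j + 1 + (m : Int) by omega]
      try omega
    · have hstep : pvStepA md (out, c, v, j) v = (out ++ [c], c, v, j + 1) := by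
        simp [pvStepA, h]
      rw [List.replicate_succ, List.foldl_cons, hstep,
          ih (j + 1) _ _ v (by omega) hmd (fun hh => absurd hh h)]
      have ha : min ((md - 1 - (j + 1)).toNat) m + 1 = min ((md - 1 - j).toNat) (m + 1) := by
        omega
      push_cast
      rw [← ha]
      simp [List.replicate_succ, List.append_assoc, Nat.succ_sub_succ,
            show (md ≤ j + 1 + (m : Int)) = (md ≤ j + ((m : Int) + 1)) from propext (by omega)]
      try omega

-- A's fold over a fresh run: m+1 copies of v, with candidate ≠ v on entry
theorem pvA_new (md : Int) (m : Nat) (out : List String) (c cand v : String) (run : Int)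
    (hne : cand ≠ v) (hmd : 2 ≤ md) :
    List.foldl (pvStepA md) (out, c, cand, run) (List.replicate (m + 1) v) =
      (out ++ List.replicate (min ((md - 1).toNat) (m + 1)) c
           ++ List.replicate ((m + 1) - min ((md - 1).toNat) (m + 1)) v,
       (if md ≤ 1 + (m : Int) then v else c), v, 1 + (m : Int)) := by
  have hstep : pvStepA md (out, c, cand, run) v = (out ++ [c], c, v, 1) := by
    have hvc : ¬ (v = cand) := fun h => hne h.symm
    simp [pvStepA, hvc, show ¬ md ≤ (1 : Int) by omega]
  rw [List.replicate_succ, List.foldl_cons, hstep,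
      pvA_in md m 1 (out ++ [c]) c v (by omega) hmd (by omega)]
  have ha : min ((md - 1 - 1).toNat) m + 1 = min ((md - 1).toNat) (m + 1) := by omega
  rw [← ha]
  simp [List.replicate_succ, List.append_assoc, Nat.succ_sub_succ]
  try omega

-- main correspondence: A's fold over the flattened groups = B's fold over the groups
theorem pvMain (md : Int) (hmd : 2 ≤ md) :
    ∀ (gs : List (String × Int)) (cand : String), (∀ g ∈ gs, 1 ≤ g.2) →
      List.IsChain Ne (cand :: gs.map Prod.fst) →
      ∀ (out : List String) (c : String) (run : Int),
      (List.foldl (pvStepA md) (out, c, cand, run) (pvFlat gs)).1 =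
        (List.foldl (pvStepB md) (out, c) gs).1 := by
  intro gs
  induction gs with
  | nil => intro cand _ _ out c run; simp [pvFlat]
  | cons g t ih =>
    intro cand hpos hchain out c run
    obtain ⟨v, L⟩ := g
    rw [List.map_cons] at hchain
    rcases List.isChain_cons_cons.mp hchain with ⟨hne, hch⟩
    have hL : 1 ≤ L := hpos _ (List.mem_cons_self ..)
    obtain ⟨m, hm⟩ : ∃ m, L.toNat = m + 1 := ⟨L.toNat - 1, by omega⟩
    have hflat : pvFlat ((v, L) :: t) = List.replicate (m + 1) v ++ pvFlat t := by
      simp [pvFlat, hm]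
    have h1 : (min (md - 1) L).toNat = min ((md - 1).toNat) (m + 1) := by omega
    have h2 : (L - min (md - 1) L).toNat = (m + 1) - min ((md - 1).toNat) (m + 1) := by omega
    have h3 : (md ≤ L) = (md ≤ 1 + (m : Int)) := propext (by omega)
    have hB : pvStepB md (out, c) (v, L)
        = (out ++ List.replicate (min ((md - 1).toNat) (m + 1)) c
               ++ List.replicate ((m + 1) - min ((md - 1).toNat) (m + 1)) v,
           if md ≤ 1 + (m : Int) then v else c) := by
      simp only [pvStepB, h1, h2, h3]
    rw [hflat, List.foldl_append, pvA_new md m out c cand v run hne hmd,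
        List.foldl_cons, hB]
    exact ih v (fun g hg => hpos g (List.mem_cons_of_mem _ hg)) hch _ _ _

-- invariant of Source B's RLE fold: the accumulator stays nonempty with positive counts
-- and adjacent-distinct values, and its reversed flattening extends the consumed input
theorem pvRle_inv : ∀ (xs : List String) (v : String) (c : Int) (rest : List (String × Int)),
    1 ≤ c → (∀ g ∈ rest, 1 ≤ g.2) → List.IsChain Ne (((v, c) :: rest).map Prod.fst) →
    ∃ w d rest', List.foldl pvRStep ((v, c) :: rest) xs = (w, d) :: rest' ∧ 1 ≤ d ∧
      (∀ g ∈ rest', 1 ≤ g.2) ∧ List.IsChain Ne (((w, d) :: rest').map Prod.fst) ∧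
      pvFlat (((w, d) :: rest').reverse) = pvFlat (((v, c) :: rest).reverse) ++ xs := by
  intro xs
  induction xs with
  | nil => intro v c rest hc hrest hch; exact ⟨v, c, rest, rfl, hc, hrest, hch, by simp⟩
  | cons x xs ih =>
    intro v c rest hc hrest hch
    by_cases hvx : v = x
    · have hstep : pvRStep ((v, c) :: rest) x = (v, c + 1) :: rest := by simp [pvRStep, hvx]
      rw [List.foldl_cons, hstep]
      obtain ⟨w, d, rest', heq, hd, hr', hch', hfl⟩ := ih v (c + 1) rest (by omega) hrest hch
      refine ⟨w, d, rest', heq, hd, hr', hch', ?_⟩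
      rw [hfl]
      have hmid : pvFlat (((v, c + 1) :: rest).reverse)
          = pvFlat (((v, c) :: rest).reverse) ++ [x] := by
        have hc1 : (c + 1).toNat = c.toNat + 1 := by omega
        simp [pvFlat, hc1, List.replicate_succ', hvx]
      rw [hmid, List.append_assoc]
      rfl
    · have hstep : pvRStep ((v, c) :: rest) x = (x, 1) :: (v, c) :: rest := by
        simp [pvRStep, hvx]
      rw [List.foldl_cons, hstep]
      obtain ⟨w, d, rest', heq, hd, hr', hch', hfl⟩ :=
        ih x 1 ((v, c) :: rest) (by omega)
          (by intro g hg
              rcases List.mem_cons.mp hg with h | h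
              · subst h; exact hc
              · exact hrest g h)
          (by rw [List.map_cons, List.map_cons]
              rw [List.map_cons] at hch
              exact List.isChain_cons_cons.mpr ⟨fun h => hvx h.symm, hch⟩)
      refine ⟨w, d, rest', heq, hd, hr', hch', ?_⟩
      rw [hfl]
      have hmid : pvFlat (((x, 1) :: (v, c) :: rest).reverse)
          = pvFlat (((v, c) :: rest).reverse) ++ [x] := by
        simp [pvFlat]
      rw [hmid, List.append_assoc]
      rfl

theorem hmm_smooth_eq_alt (raw : List String) (md : Int) :
    hmm_smooth raw md = hmm_smooth_alt raw md := by
  cases raw with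
  | nil => rfl
  | cons r0 rest =>
    by_cases hmd : md ≤ 1
    · simp [hmm_smooth, hmm_smooth_alt, hmd]
    · have hmd2 : 2 ≤ md := by omega
      obtain ⟨w, d, rest', heq, hd, hr', hch, hfl⟩ :=
        pvRle_inv rest r0 1 [] (by omega) (by simp) (by simp)
      have hrle : pvRle (r0 :: rest) = ((w, d) :: rest').reverse := by
        unfold pvRle
        rw [List.foldl_cons]
        show (List.foldl pvRStep [(r0, 1)] rest).reverse = _
        rw [heq]
      -- properties of the reversed group list
      have hpos : ∀ g ∈ ((w, d) :: rest').reverse, 1 ≤ g.2 := by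
        intro g hg
        rw [List.mem_reverse] at hg
        rcases List.mem_cons.mp hg with h | h
        · subst h; exact hd
        · exact hr' g h
      have hchainrev : List.IsChain Ne ((((w, d) :: rest').reverse).map Prod.fst) := by
        rw [List.map_reverse, List.isChain_reverse]
        exact hch.imp fun _ _ hab => hab.symm
      have hflat0 : pvFlat (((w, d) :: rest').reverse) = r0 :: rest := by
        rw [hfl]; simp [pvFlat]
      -- destructure the group list
      obtain ⟨g1, t, hgs⟩ := List.exists_cons_of_ne_nil
        (show ((w, d) :: rest').reverse ≠ [] by simp)
      obtain ⟨v0, L0⟩ := g1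
      rw [hgs] at hpos hchainrev hflat0 hrle
      have hL0 : 1 ≤ L0 := hpos _ (List.mem_cons_self ..)
      obtain ⟨m, hm⟩ : ∃ m, L0.toNat = m + 1 := ⟨L0.toNat - 1, by omega⟩
      have hv0 : v0 = r0 := by
        have h' : pvFlat ((v0, L0) :: t) = v0 :: (List.replicate m v0 ++ pvFlat t) := by
          simp [pvFlat, hm, List.replicate_succ]
        rw [h'] at hflat0
        injection hflat0 with hh _
        try exact hh
      subst hv0
      have hraw : (v0 :: rest : List String) = List.replicate (m + 1) v0 ++ pvFlat t := by
        rw [← hflat0]; simp [pvFlat, hm]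
      -- first group on A's side
      have hA1 := pvA_in md (m + 1) 1 [] v0 v0 (by omega) hmd2 (fun _ => rfl)
      have hmerge : ∀ (a b : Nat) (s : String), a + b = m + 1 →
          ([] : List String) ++ List.replicate a s ++ List.replicate b s
            = List.replicate (m + 1) s := by
        intro a b s hab
        rw [← hab, List.replicate_add]; simp
      rw [hmerge _ _ _ (by omega), ite_self] at hA1
      -- first group on B's side
      have hB1 : pvStepB md ([], v0) (v0, L0) = (List.replicate (m + 1) v0, v0) := by
        have hk : (min (md - 1) L0).toNat + (L0 - min (md - 1) L0).toNat = m + 1 := by omega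
        simp only [pvStepB]
        rw [hmerge _ _ v0 hk, ite_self]
      -- chain over the tail groups, anchored at v0
      have hchain_t : List.IsChain Ne (v0 :: t.map Prod.fst) := by
        rw [List.map_cons] at hchainrev; exact hchainrev
      have hpos_t : ∀ g ∈ t, 1 ≤ g.2 := fun g hg => hpos g (List.mem_cons_of_mem _ hg)
      calc hmm_smooth (v0 :: rest) md
          = (List.foldl (pvStepA md) ([], v0, v0, 1) (v0 :: rest)).1 := by
            simp [hmm_smooth, hmd]
        _ = (List.foldl (pvStepA md)
              (List.foldl (pvStepA md) ([], v0, v0, 1) (List.replicate (m + 1) v0))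
              (pvFlat t)).1 := by rw [hraw, List.foldl_append]
        _ = (List.foldl (pvStepA md)
              (List.replicate (m + 1) v0, v0, v0, 1 + ((m : Int) + 1)) (pvFlat t)).1 := by
            rw [hA1]; push_cast; ring_nf
        _ = (List.foldl (pvStepB md) (List.replicate (m + 1) v0, v0) t).1 :=
            pvMain md hmd2 t v0 hpos_t hchain_t _ _ _
        _ = hmm_smooth_alt (v0 :: rest) md := by
            simp only [hmm_smooth_alt]
            rw [if_neg hmd, hrle, List.foldl_cons, hB1]

-- ===== VERDICT (by name: the statement is the Claim_ definition above) =====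
theorem hmm_smooth_spec : Claim_equal_hmm_smooth := by
  intro raw md _
  unfold Spec_hmm_smooth
  exact hmm_smooth_eq_alt raw md
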